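-- pv_equiv track=rewrite | github.com/Kartik-Sangwan/CSC-108 | assignment3/tweets.py | detect_author
-- ===== SOURCE A (Python) =====
-- from typing import List, Dict, TextIO, Tuple
--
-- HASH_SYMBOL = '#'
--
-- TWEET_TEXT_INDEX = 0
--
-- def first_alnum_substring(text: str) -> str:
--     """Return all alphanumeric characters in text from the beginning up to the
--     first non-alphanumeric character, or, if text does not contain any
--     non-alphanumeric characters, up to the end of text."
--
--     >>> first_alnum_substring('')
--     ''
--     >>> first_alnum_substring('IamIamIam')
--     'iamiamiam'
--     >>> first_alnum_substring('IamIamIam!!')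
--     'iamiamiam'
--     >>> first_alnum_substring('IamIamIam!!andMore')
--     'iamiamiam'
--     >>> first_alnum_substring('$$$money')
--     ''
--     """
--
--     index = 0
--     while index < len(text) and text[index].isalnum():
--         index += 1
--     return text[:index].lower()
--
-- def extract_hashtags(text: str) -> List[str]:
--     """Return a list containing only all of the unique hashtags in the text, in
--     the order they appear in the text converted to lowercase.
--
--     >>> extract_hashtags('Hi #UofT do you like #cats #CATS #meowmeow')
--     ['uoft', 'cats', 'meowmeow']
--     >>> extract_hashtags('#cats are #cute #cats #cat meow @meow')
--     ['cats', 'cute', 'cat']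
--     >>> extract_hashtags('@many #cats$extra meow?!')
--     ['cats']
--     >>> extract_hashtags('No valid hashtags #! here?')
--     []
--
--     """
--     result = []
--     for i in range(len(text)):
--         if text[i] == HASH_SYMBOL:
--             string = text[i+1:]
--             word = first_alnum_substring(string)
--             if word != '' and word not in result:
--                 result.append(word)
--     return result
--
-- def detect_author(dic: Dict[str, List[tuple]], text: str) -> str:
--     """dic represents a dictionary in the format produced by
--     read_tweets and text is a tweet's text. This function returns the username
--     (in lowercase) of the most likely author of that tweet, based on the
--     hashtags they use. If all hashtags in the tweet are uniquely used by a
--     single user, then return that user's username. Otherwise, return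
--     the string 'unknown'.
--
--     >>> a = {'uoftcompsci': [('RT @_AlecJacobson: @UofTCompSci St. George (Downtown) Campus is hiring in Computational Geometry for a Tenure Stream Faculty Position. Tell your friends!\\n\\nhttps://t.co/O9Oui82dEA', 20181108132750, 'Twitter for Android', 0, 5), ('Congratulations to all our fall graduates!  https://t.co/iRXYwYUAKa', 20181106202405, 'Twitter for Android', 6, 1), ("RT @UaigUoft: And... it's a wrap!\\n\\nThank you to all our speakers, sponsors, and attendees for making #StartAI an unforgettable experience for us. We hope you feel the same. \\n\\nTweet us your StartAI photos! https://t.co/5zi4AAAyfS", 20181104014855, 'Twitter for Android', 0, 2), ('Today! @nickfrosst is a panelist at #StartAI!  #uoftalumni #UofT https://t.co/k50ea9qKhb (via @UofTNews)', 20181103122515, 'Twitter for Android', 5, 0)], 'uoftartsci': [('From a family of 12 kids in a Kenyan village, this #UofT grad is working to help other women get an education https://t.co/UnUMe9zMn4', 20181109193619, 'Twitter Web Client', 2, 0)]}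
--     >>> detect_author(a, 'buddy and no hashtags uoft')
--     'unkown'
--     >>> detect_author(a, '#uoft single common hashtag')
--     'unkown'
--     >>> detect_author(a, '#STARTai single hashtag case sensitive')
--     'uoftcompsci'
--     >>> detect_author(a,'#uoft and #startai one common and both hashtags in one')
--     'unkown'
--     >>> detect_author(a,'#uoftsas and #startai random hashtag and one common')
--     'unkown'
--     """
--     hashtags = extract_hashtags(text)
--     u_hashtags = {}
--     for user in dic:
--         tweets = dic[user]
--         u_hashtags[user] = []
--         for tweet in tweets:
--             t = tweet[TWEET_TEXT_INDEX]
--             u_hashtags[user] = u_hashtags[user] + extract_hashtags(t)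
--     f = 0
--     for user in u_hashtags:
--         lst = u_hashtags[user]
--         for item in hashtags:
--             if item in lst:
--                 f += 1
--                 tuser = user
--     if f == len(hashtags) and f != 0:
--         return tuser
--     else:
--         return 'unkown'
-- ===== SOURCE B (Python) =====
-- def _hashtags(text):
--     """Unique lowercased hashtag words of text, in order of first appearance,
--     computed by splitting on '#' instead of scanning every index."""
--     seen = {}
--     for seg in text.split('#')[1:]:
--         n = 0
--         for ch in seg:
--             if not ch.isalnum():
--                 break
--             n += 1
--         word = seg[:n].lower()
--         if word:
--             seen[word] = None
--     return list(seen)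
--
--
-- def detect_author(dic, text):
--     query = _hashtags(text)
--     # Inverted index: hashtag -> number of distinct users whose tweets use it.
--     index = {}
--     tuser = None
--     for user, tweets in dic.items():
--         utags = set()
--         for tweet in tweets:
--             utags.update(_hashtags(tweet[0]))
--         for h in utags:
--             index[h] = index.get(h, 0) + 1
--         if not utags.isdisjoint(query):
--             tuser = user
--     # Total number of (user, query-tag) incidences, read off the index.
--     f = sum(index.get(h, 0) for h in query)
--     if f == len(query) and f != 0:
--         return tuser
--     return 'unkown'
-- ===== Notes on version B (the rewrite author's own statement) =====
-- stated objective: alternative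
-- what changed: B inverts the counting: hashtags are extracted by splitting on '#', and instead of A's user->tag-list dict followed by a nested users x query membership loop, B builds an inverted index hashtag -> number of distinct users using it, obtains the total match count f by summing index lookups over the query tags, and finds the returned user separately as the last user whose tag set is not disjoint from the query.
import Mathlib
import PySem

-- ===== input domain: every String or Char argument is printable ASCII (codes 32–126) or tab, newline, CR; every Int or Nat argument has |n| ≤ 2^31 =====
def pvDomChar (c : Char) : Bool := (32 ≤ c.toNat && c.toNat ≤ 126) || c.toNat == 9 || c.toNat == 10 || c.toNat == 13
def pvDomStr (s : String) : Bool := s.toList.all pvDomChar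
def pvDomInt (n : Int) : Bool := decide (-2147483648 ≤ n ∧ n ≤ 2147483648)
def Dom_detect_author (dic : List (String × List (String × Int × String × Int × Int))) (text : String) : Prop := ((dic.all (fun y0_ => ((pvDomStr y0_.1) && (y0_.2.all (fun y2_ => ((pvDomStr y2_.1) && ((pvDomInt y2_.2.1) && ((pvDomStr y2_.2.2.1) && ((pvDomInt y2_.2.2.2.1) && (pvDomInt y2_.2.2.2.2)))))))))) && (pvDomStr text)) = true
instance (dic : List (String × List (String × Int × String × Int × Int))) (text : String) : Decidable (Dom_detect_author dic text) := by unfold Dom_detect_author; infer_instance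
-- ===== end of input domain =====

-- B inverts A's counting: instead of A's user->tag-list dict and nested users x query membership
-- loop, B builds an inverted index hashtag -> number of distinct users using it, sums index
-- lookups over the query tags, and picks the last user whose tag set meets the query; hashtags
-- are extracted by splitting on '#' rather than re-scanning a suffix at every index
-- (objective: alternative); return values agree on every input.

-- ===== PORT A =====

-- first_alnum_substring: the while loop counts the alphanumeric prefix, text[:index] is exactly
-- that prefix (takeWhile), then .lower()
def pvFirstAlnum (cs : List Char) : List Char :=
  PySem.Chars.lower (cs.takeWhile PySem.Chars.isalnum)

def pvExtract : List Char → List (List Char) → List (List Char)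
  | [], res => res
  | c :: rest, res =>
      pvExtract rest
        (if c = '#' then
          (let w := pvFirstAlnum rest
           if w ≠ [] ∧ w ∉ res then res ++ [w] else res)
         else res)
def detect_author (dic : List (String × List (String × Int × String × Int × Int))) (text : String) : String :=
  let hashtags := pvExtract text.toList []
  -- 'for user in dic: tweets = dic[user]' iterates the dict's (user, tweets) items in order
  let u : PySem.Dict String (List (List Char)) :=
    (PySem.Dict.ofList dic).items.foldl
      (fun u p =>
        p.2.foldl
          (fun u2 tweet => u2.insert p.1 (u2.getD p.1 [] ++ pvExtract tweet.1.toList []))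
          (u.insert p.1 []))
      PySem.Dict.empty
  -- tuser starts unbound in Python and is only read when f ≠ 0, i.e. after it was assigned;
  -- "" stands for the unbound state
  let ft : Int × String :=
    u.items.foldl
      (fun acc p =>
        hashtags.foldl
          (fun x item => if item ∈ p.2 then (x.1 + 1, p.1) else x) acc)
      (0, "")
  if ft.1 = (hashtags.length : Int) ∧ ft.1 ≠ 0 then ft.2 else "unkown"

-- ===== PORT B =====

-- _hashtags: split on '#', take the leading alphanumeric run of each later segment (the counting
-- loop + slice is takeWhile), lowercase, ordered dedup (the dict used as ordered set is PySem.Set)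
def pvTagsOf (cs : List Char) : List (List Char) :=
  ((PySem.Chars.splitOn cs ['#']).tail).foldl
    (fun seen seg =>
      let w := PySem.Chars.lower (seg.takeWhile PySem.Chars.isalnum)
      if w ≠ [] then PySem.Set.add seen w else seen)
    PySem.Set.empty
def detect_author_alt (dic : List (String × List (String × Int × String × Int × Int))) (text : String) : String :=
  let query := pvTagsOf text.toList
  -- one pass over the users: index counts, per hashtag, the users whose tag set holds it
  -- (the per-user increment loop iterates a set; the counts do not depend on that order),
  -- and tuser records the last user whose tag set is not disjoint from the query
  let st : PySem.Dict (List Char) Int × Option String :=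
    (PySem.Dict.ofList dic).items.foldl
      (fun st p =>
        let utags : PySem.Set (List Char) :=
          p.2.foldl (fun s tweet => PySem.Set.update s (pvTagsOf tweet.1.toList)) PySem.Set.empty
        (utags.foldl (fun d h => d.insert h (d.getD h 0 + 1)) st.1,
         if PySem.Set.isdisjoint utags query then st.2 else some p.1))
      (PySem.Dict.empty, none)
  let f : Int := query.foldl (fun s h => s + st.1.getD h 0) 0
  if f = (query.length : Int) ∧ f ≠ 0 then
    (match st.2 with
     | some u => u
     | none => "unkown")
  else "unkown"

-- ===== PRECONDITION & SPEC =====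
def Spec_detect_author (dic : List (String × List (String × Int × String × Int × Int))) (text : String) (out : String) : Prop := out = detect_author_alt dic text
instance (dic : List (String × List (String × Int × String × Int × Int))) (text : String) (out : String) : Decidable (Spec_detect_author dic text out) := by unfold Spec_detect_author; infer_instance

-- ===== CLAIM (what is proved, stated in full; the proofs are below) =====
def Claim_equal_detect_author : Prop := ∀ (dic : List (String × List (String × Int × String × Int × Int))) (text : String), Dom_detect_author dic text → Spec_detect_author dic text (detect_author dic text)

-- ===== LEMMAS AND PROOFS =====

def hsplit : List Char → List Char → List (List Char)
  | pre, [] => [pre]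
  | pre, c :: rest => if c = '#' then pre :: hsplit [] rest else hsplit (pre ++ [c]) rest

def hwords : List Char → List (List Char)
  | [] => []
  | c :: rest => if c = '#' then pvFirstAlnum rest :: hwords rest else hwords rest

lemma splitOn_go_eq (fuel : Nat) : ∀ (l cur : List Char) (acc : List (List Char)),
    l.length < fuel →
    PySem.Chars.splitOn.go ['#'] fuel l cur acc = acc.reverse ++ hsplit cur.reverse l := by
  induction fuel with
  | zero => intro l cur acc h; omega
  | succ n ih =>
    intro l cur acc h
    cases l with
    | nil => simp [PySem.Chars.splitOn.go, hsplit]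
    | cons c rest =>
      by_cases hc : c = '#'
      · subst hc
        rw [PySem.Chars.splitOn.go]
        simp only [List.isPrefixOf, List.length_cons] at *
        rw [if_pos (by simp)]
        rw [ih _ _ _ (by simpa using h)]
        simp [hsplit]
      · rw [PySem.Chars.splitOn.go]
        rw [if_neg (by simp [List.isPrefixOf]; intro hh; exact hc hh.symm)]
        rw [ih _ _ _ (by simpa using (Nat.lt_of_succ_lt_succ (by simpa using h)))]
        simp [hsplit, hc]

lemma takeWhile_append_of_neg {p : Char → Bool} {c : Char} (hc : p c = false)
    (xs ys : List Char) : (xs ++ c :: ys).takeWhile p = xs.takeWhile p := by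
  induction xs with
  | nil => simp [List.takeWhile, hc]
  | cons x xs ih =>
    simp only [List.cons_append, List.takeWhile]
    cases hx : p x
    · simp
    · simp [ih]

lemma map_hsplit (cs : List Char) : ∀ pre : List Char,
    (hsplit pre cs).map (fun seg => PySem.Chars.lower (seg.takeWhile PySem.Chars.isalnum))
      = PySem.Chars.lower ((pre ++ cs).takeWhile PySem.Chars.isalnum) :: hwords cs := by
  induction cs with
  | nil => intro pre; simp [hsplit, hwords]
  | cons c rest ih =>
    intro pre
    by_cases hc : c = '#'
    · subst hc
      have e1 : hsplit pre ('#' :: rest) = pre :: hsplit [] rest := by simp [hsplit]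
      have e2 : hwords ('#' :: rest) = pvFirstAlnum rest :: hwords rest := by simp [hwords]
      have h1 : (pre ++ '#' :: rest).takeWhile PySem.Chars.isalnum = pre.takeWhile PySem.Chars.isalnum :=
        takeWhile_append_of_neg (by decide) pre rest
      rw [e1, e2, List.map_cons, ih [], h1]
      simp [pvFirstAlnum]
    · have e1 : hsplit pre (c :: rest) = hsplit (pre ++ [c]) rest := by simp [hsplit, hc]
      have e2 : hwords (c :: rest) = hwords rest := by simp [hwords, hc]
      rw [e1, e2, ih (pre ++ [c])]
      simp [List.append_assoc]

lemma pvExtract_eq_foldl (cs : List Char) : ∀ res,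
    pvExtract cs res
      = (hwords cs).foldl (fun r w => if w ≠ [] ∧ w ∉ r then r ++ [w] else r) res := by
  induction cs with
  | nil => intro res; simp [pvExtract, hwords]
  | cons c rest ih =>
    intro res
    by_cases hc : c = '#'
    · subst hc
      have e1 : pvExtract ('#' :: rest) res
          = pvExtract rest (if pvFirstAlnum rest ≠ [] ∧ pvFirstAlnum rest ∉ res then res ++ [pvFirstAlnum rest] else res) := by
        simp [pvExtract]
      have e2 : hwords ('#' :: rest) = pvFirstAlnum rest :: hwords rest := by simp [hwords]
      rw [e1, e2, List.foldl_cons, ih]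
    · have e1 : pvExtract (c :: rest) res = pvExtract rest res := by simp [pvExtract, hc]
      have e2 : hwords (c :: rest) = hwords rest := by simp [hwords, hc]
      rw [e1, e2, ih]

lemma tags_eq (cs : List Char) : pvExtract cs [] = pvTagsOf cs := by
  have hmap := map_hsplit cs []
  rw [pvExtract_eq_foldl]
  unfold pvTagsOf
  have hsp : PySem.Chars.splitOn cs ['#'] = hsplit [] cs := by
    rw [PySem.Chars.splitOn, splitOn_go_eq _ _ _ _ (by omega)]
    simp
  rw [hsp]
  rw [show (((hsplit [] cs).tail).foldl
      (fun seen seg =>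
        let w := PySem.Chars.lower (seg.takeWhile PySem.Chars.isalnum)
        if w ≠ [] then PySem.Set.add seen w else seen) PySem.Set.empty)
    = ((((hsplit [] cs).tail).map (fun seg => PySem.Chars.lower (seg.takeWhile PySem.Chars.isalnum))).foldl
      (fun seen w => if w ≠ [] then PySem.Set.add seen w else seen) PySem.Set.empty) from by rw [List.foldl_map]]
  have htail : (((hsplit [] cs).tail).map (fun seg => PySem.Chars.lower (seg.takeWhile PySem.Chars.isalnum))) = hwords cs := by
    cases h : hsplit [] cs with
    | nil => rw [h] at hmap; simp at hmap
    | cons a t =>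
      rw [h] at hmap
      simp only [List.map_cons, List.cons.injEq] at hmap
      simpa using hmap.2
  rw [htail]
  have hfun : (fun (r : List (List Char)) (w : List Char) => if w ≠ [] ∧ w ∉ r then r ++ [w] else r)
      = (fun (seen : List (List Char)) (w : List Char) => if w ≠ [] then PySem.Set.add seen w else seen) := by
    funext r w
    by_cases h1 : w = []
    · simp [h1]
    · by_cases h2 : w ∈ r
      · rw [if_neg (by simp [h2]), if_pos h1, PySem.Set.add_of_mem h2]
      · rw [if_pos ⟨h1, h2⟩, if_pos h1, PySem.Set.add_of_not_mem h2]
  rw [hfun]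
  rfl

lemma inner_items (k : String) :
    ∀ (tweets : List (String × Int × String × Int × Int)) (d : PySem.Dict String (List (List Char)))
      (itms : List (String × List (List Char))) (v : List (List Char)),
      d.items = itms ++ [(k, v)] → k ∉ itms.map Prod.fst → (itms.map Prod.fst).Nodup →
      (tweets.foldl (fun u2 tweet => u2.insert k (u2.getD k [] ++ pvExtract tweet.1.toList [])) d).items
        = itms ++ [(k, tweets.foldl (fun a tw => a ++ pvExtract tw.1.toList []) v)] := by
  intro tweets
  induction tweets with
  | nil => intro d itms v hd _ _; simpa using hd
  | cons tw tws ih =>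
    intro d itms v hd hk hnd
    have hkeys : d.keys = itms.map Prod.fst ++ [k] := by
      simp only [PySem.Dict.keys, hd, List.map_append, List.map_cons, List.map_nil]
    have hndk : d.keys.Nodup := by
      rw [hkeys]
      refine hnd.append (by simp) ?_
      intro a ha hb
      rw [List.mem_singleton] at hb
      exact hk (hb ▸ ha)
    have hmem : (k, v) ∈ d.items := by rw [hd]; simp
    have hget : d.getD k [] = v :=
      PySem.Dict.getD_of_mem_items d hmem hndk []
    have hcont : d.contains k = true :=
      (PySem.Dict.contains_iff_mem_keys _ _).mpr (by rw [hkeys]; simp)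
    have hins : (d.insert k (v ++ pvExtract tw.1.toList [])).items
        = itms ++ [(k, v ++ pvExtract tw.1.toList [])] := by
      rw [PySem.Dict.items_insert_of_contains d _ hcont, hd, List.map_append]
      congr 1
      · conv_rhs => rw [← List.map_id itms]
        apply List.map_congr_left
        intro p hp
        have hpk : p.1 ≠ k := fun e => hk (e ▸ List.mem_map_of_mem hp)
        simp [hpk]
      · simp
    rw [List.foldl_cons, List.foldl_cons, hget]
    exact ih _ itms (v ++ pvExtract tw.1.toList []) hins hk hnd

lemma build_items :
    ∀ (L : List (String × List (String × Int × String × Int × Int)))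
      (d : PySem.Dict String (List (List Char))),
      (d.keys ++ L.map Prod.fst).Nodup →
      (L.foldl (fun u p =>
          p.2.foldl (fun u2 tweet => u2.insert p.1 (u2.getD p.1 [] ++ pvExtract tweet.1.toList []))
            (u.insert p.1 [])) d).items
        = d.items ++ L.map (fun p => (p.1, p.2.foldl (fun a tw => a ++ pvExtract tw.1.toList []) [])) := by
  intro L
  induction L with
  | nil => intro d _; simp only [List.foldl_nil, List.map_nil, List.append_nil]
  | cons p ps ih =>
    intro d h
    have hp1 : p.1 ∉ d.keys := by
      intro hmem
      exact (List.disjoint_of_nodup_append h) hmem (by simp)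
    have hcontF : d.contains p.1 = false := by
      cases hc : d.contains p.1
      · rfl
      · exact absurd ((PySem.Dict.contains_iff_mem_keys _ _).mp hc) hp1
    have e1 : (d.insert p.1 ([] : List (List Char))).items = d.items ++ [(p.1, [])] :=
      PySem.Dict.items_insert_of_not_contains d _ hcontF
    have hkeq : d.keys = d.items.map Prod.fst := by simp [PySem.Dict.keys]
    have hndk : (d.items.map Prod.fst).Nodup := by
      rw [← hkeq]
      simp only [List.nodup_append] at h
      exact h.1
    have e2 := inner_items p.1 p.2 (d.insert p.1 []) d.items [] e1 (hkeq ▸ hp1) hndk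
    rw [List.foldl_cons, ih _ ?hnd]
    · rw [e2]
      simp [List.append_assoc]
    case hnd =>
      have hkeys2 : (p.2.foldl (fun u2 tweet => u2.insert p.1 (u2.getD p.1 [] ++ pvExtract tweet.1.toList []))
          (d.insert p.1 [])).keys = d.items.map Prod.fst ++ [p.1] := by
        simp only [PySem.Dict.keys, e2, List.map_append, List.map_cons, List.map_nil]
      rw [hkeys2, ← hkeq, List.append_assoc]
      simpa using h

lemma utags_mem (h : List Char) :
    ∀ (tweets : List (String × Int × String × Int × Int)) (s : PySem.Set (List Char)),
      (h ∈ tweets.foldl (fun s2 tw => PySem.Set.update s2 (pvTagsOf tw.1.toList)) s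
        ↔ h ∈ s ∨ ∃ tw ∈ tweets, h ∈ pvTagsOf tw.1.toList) := by
  intro tweets
  induction tweets with
  | nil => intro s; simp
  | cons tw tws ih =>
    intro s
    rw [List.foldl_cons, ih]
    rw [PySem.Set.mem_update]
    constructor
    · rintro (⟨hs | ht⟩ | ⟨x, hx, hh⟩)
      · exact Or.inl hs
      · exact Or.inr ⟨tw, by simp, ht⟩
      · exact Or.inr ⟨x, by simp [hx], hh⟩
    · rintro (hs | ⟨x, hx, hh⟩)
      · exact Or.inl (Or.inl hs)
      · rcases List.mem_cons.mp hx with he | hm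
        · exact Or.inl (Or.inr (he ▸ hh))
        · exact Or.inr ⟨x, hm, hh⟩

lemma cat_mem (h : List Char) (tweets : List (String × Int × String × Int × Int)) :
    h ∈ tweets.foldl (fun a tw => a ++ pvExtract tw.1.toList []) []
      ↔ ∃ tw ∈ tweets, h ∈ pvExtract tw.1.toList [] := by
  rw [PySem.List.foldl_append_eq_flatMap]
  simp only [List.nil_append, List.mem_flatMap]

lemma mem_setB_iff (h : List Char) (tweets : List (String × Int × String × Int × Int)) :
    h ∈ tweets.foldl (fun s tw => PySem.Set.update s (pvTagsOf tw.1.toList)) PySem.Set.empty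
      ↔ h ∈ tweets.foldl (fun a tw => a ++ pvExtract tw.1.toList []) [] := by
  rw [utags_mem, cat_mem]
  simp only [← tags_eq]
  simp [PySem.Set.empty]

lemma nodup_setB (tweets : List (String × Int × String × Int × Int)) :
    (tweets.foldl (fun s tw => PySem.Set.update s (pvTagsOf tw.1.toList)) PySem.Set.empty).Nodup := by
  suffices hgen : ∀ s : PySem.Set (List Char), s.Nodup →
      (tweets.foldl (fun s tw => PySem.Set.update s (pvTagsOf tw.1.toList)) s).Nodup by
    exact hgen _ (by simp [PySem.Set.empty])
  induction tweets with
  | nil => intro s hs; simpa using hs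
  | cons tw tws ih =>
    intro s hs
    exact ih (PySem.Set.update s (pvTagsOf tw.1.toList)) (PySem.Set.nodup_update s (pvTagsOf tw.1.toList) hs)

-- A's inner loop over the query hashtags: adds the match count, sets the user iff it matched
lemma innerA (lst : List (List Char)) (user : String) :
    ∀ (hts : List (List Char)) (a : Int) (t : String),
      hts.foldl (fun x item => if item ∈ lst then (x.1 + 1, user) else x) (a, t)
        = (a + (hts.countP (fun h => decide (h ∈ lst)) : Int),
           if hts.countP (fun h => decide (h ∈ lst)) = 0 then t else user) := by
  intro hts
  induction hts with
  | nil => intro a t; simp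
  | cons x xs ih =>
    intro a t
    by_cases hx : x ∈ lst
    · rw [List.foldl_cons, if_pos hx, ih]
      rw [Prod.ext_iff]
      constructor
      · simp only [List.countP_cons, hx, decide_true]
        push_cast
        ring
      · rw [ite_self]
        rw [if_neg (by simp [hx])]
    · rw [List.foldl_cons, if_neg hx, ih]
      simp [hx]

-- the inverted index: after the user loop, each hashtag's count is the number of users holding it
lemma index_getD {α : Type} (S : α → PySem.Set (List Char)) (hS : ∀ p, (S p).Nodup) :
    ∀ (L : List α) (d : PySem.Dict (List Char) Int) (x : List Char),
      (L.foldl (fun d p => (S p).foldl (fun (d2 : PySem.Dict (List Char) Int) h => d2.insert h (d2.getD h 0 + 1)) d) d).getD x 0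
        = d.getD x 0 + (L.countP (fun p => decide (x ∈ S p)) : Int) := by
  intro L
  induction L with
  | nil => intro d x; simp
  | cons p ps ih =>
    intro d x
    rw [List.foldl_cons, ih, PySem.Dict.getD_foldl_insert_add_one]
    rw [List.countP_cons]
    by_cases hx : x ∈ S p
    · rw [List.count_eq_one_of_mem (hS p) hx]
      simp [hx]
      ring
    · rw [List.count_eq_zero_of_not_mem hx]
      simp [hx]

-- double counting: summing per-user query matches equals summing per-hashtag user counts
lemma exchange {α : Type} (query : List (List Char)) (S : α → PySem.Set (List Char)) :
    ∀ (L : List α),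
      (L.map (fun p => (query.countP (fun h => decide (h ∈ S p)) : Int))).sum
        = (query.map (fun h => (L.countP (fun p => decide (h ∈ S p)) : Int))).sum := by
  intro L
  induction L with
  | nil => simp
  | cons p ps ih =>
    rw [List.map_cons, List.sum_cons, ih]
    rw [show (query.map (fun h => ((p :: ps).countP (fun q => decide (h ∈ S q)) : Int)))
        = query.map (fun h => (if decide (h ∈ S p) = true then (1:Int) else 0)
            + (ps.countP (fun q => decide (h ∈ S q)) : Int)) from
      List.map_congr_left (by
        intro h _
        rw [List.countP_cons]
        by_cases hx : h ∈ S p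
        · simp only [hx, decide_true, if_true]
          push_cast
          ring_nf
        · simp [hx])]
    rw [PySem.List.sum_map_add_int, PySem.List.sum_map_ite_one_zero]

-- the last-matching-user accumulators of A (a String) and B (an Option String) stay in step
lemma snd_rel {α : Type} (cnt : α → Nat) (dj : α → Bool) (who : α → String)
    (hiff : ∀ p, cnt p = 0 ↔ dj p = true) :
    ∀ (L : List α) (t : String) (o : Option String),
      (∀ u, o = some u → t = u) →
      ((∀ u, L.foldl (fun o p => if dj p then o else some (who p)) o = some u →
          L.foldl (fun t p => if cnt p = 0 then t else who p) t = u) ∧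
       (L.foldl (fun o p => if dj p then o else some (who p)) o = none →
          o = none ∧ ∀ p ∈ L, cnt p = 0)) := by
  intro L
  induction L with
  | nil =>
    intro t o hR
    exact ⟨fun u hu => hR u hu, fun h => ⟨h, by simp⟩⟩
  | cons p ps ih =>
    intro t o hR
    by_cases hd : dj p = true
    · have hc : cnt p = 0 := (hiff p).mpr hd
      simp only [List.foldl_cons, hd, if_true, hc]
      obtain ⟨h1, h2⟩ := ih t o hR
      refine ⟨h1, fun hn => ?_⟩
      obtain ⟨ho, hall⟩ := h2 hn
      refine ⟨ho, fun q hq => ?_⟩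
      rcases List.mem_cons.mp hq with he | hm
      · exact he ▸ hc
      · exact hall q hm
    · have hc : cnt p ≠ 0 := fun h0 => hd ((hiff p).mp h0)
      simp only [List.foldl_cons, hd, if_neg hc]
      obtain ⟨h1, h2⟩ := ih (who p) (some (who p)) (fun u hu => Option.some.inj hu)
      refine ⟨h1, fun hn => absurd ((h2 hn).1) (by simp)⟩

-- a per-user match count over the tag set equals the count over the concatenated tag list
lemma countP_setB_eq (query : List (List Char)) (tweets : List (String × Int × String × Int × Int)) :
    query.countP (fun h => decide (h ∈ tweets.foldl (fun s tw => PySem.Set.update s (pvTagsOf tw.1.toList)) PySem.Set.empty))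
      = query.countP (fun h => decide (h ∈ tweets.foldl (fun a tw => a ++ pvExtract tw.1.toList []) [])) := by
  apply List.countP_congr
  intro h _
  simp only [decide_eq_true_eq]
  exact mem_setB_iff h tweets

-- A's outer loop over the user->tag-list items: total count and last matching user, as two folds
lemma outerA (query : List (List Char)) :
    ∀ (L : List (String × List (String × Int × String × Int × Int))) (a : Int) (t : String),
      (L.map (fun p => (p.1, p.2.foldl (fun acc tw => acc ++ pvExtract tw.1.toList []) []))).foldl
        (fun acc p => query.foldl (fun x item => if item ∈ p.2 then (x.1 + 1, p.1) else x) acc) (a, t)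
      = (L.foldl (fun a' p => a' + (query.countP (fun h => decide (h ∈ p.2.foldl (fun acc tw => acc ++ pvExtract tw.1.toList []) [])) : Int)) a,
         L.foldl (fun t' p => if query.countP (fun h => decide (h ∈ p.2.foldl (fun acc tw => acc ++ pvExtract tw.1.toList []) [])) = 0 then t' else p.1) t) := by
  intro L
  induction L with
  | nil => intro a t; simp
  | cons p ps ih =>
    intro a t
    simp only [List.map_cons, List.foldl_cons]
    rw [innerA, ih]

-- disjointness of the tag set from the query says exactly that the match count is zero
lemma cnt_zero_iff (query : List (List Char)) (tweets : List (String × Int × String × Int × Int)) :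
    query.countP (fun h => decide (h ∈ tweets.foldl (fun a tw => a ++ pvExtract tw.1.toList []) [])) = 0
      ↔ PySem.Set.isdisjoint
          (tweets.foldl (fun s tw => PySem.Set.update s (pvTagsOf tw.1.toList)) PySem.Set.empty) query = true := by
  rw [PySem.Set.isdisjoint_iff, List.countP_eq_zero]
  constructor
  · intro hz x hx hq
    exact absurd (by simpa using (mem_setB_iff x tweets).mp hx) (by simpa using hz x hq)
  · intro hdj h hq
    simp only [decide_eq_true_eq]
    intro hm
    exact hdj h ((mem_setB_iff h tweets).mpr hm) hq

-- ===== VERDICT (by name: the statement is the Claim_ definition above) =====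
theorem detect_author_spec : Claim_equal_detect_author := by
  unfold Claim_equal_detect_author
  intro dic text _
  unfold Spec_detect_author
  unfold detect_author detect_author_alt
  simp only []
  set query := pvTagsOf text.toList with hq
  have hqa : pvExtract text.toList [] = query := tags_eq _
  rw [hqa]
  set L := (PySem.Dict.ofList dic).items with hLdef
  -- A's dict of concatenated tag lists has items L.map (fun p => (p.1, lstA p))
  have hL : (L.map Prod.fst).Nodup := by
    have h0 := PySem.Dict.nodup_keys_ofList dic
    simpa [PySem.Dict.keys] using h0
  have hE : (PySem.Dict.empty : PySem.Dict String (List (List Char))).items = [] := rfl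
  have hEk : (PySem.Dict.empty : PySem.Dict String (List (List Char))).keys = [] := rfl
  have hbuild := build_items L PySem.Dict.empty (by rw [hEk]; simpa using hL)
  rw [hE, List.nil_append] at hbuild
  rw [hbuild]
  -- abbreviations for the per-user tag list (A) and tag set (B)
  set lstA := fun p : String × List (String × Int × String × Int × Int) =>
    p.2.foldl (fun a tw => a ++ pvExtract tw.1.toList []) [] with hlstA
  set setB := fun p : String × List (String × Int × String × Int × Int) =>
    p.2.foldl (fun s tw => PySem.Set.update s (pvTagsOf tw.1.toList)) PySem.Set.empty with hsetB
  set cnt := fun p : String × List (String × Int × String × Int × Int) =>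
    query.countP (fun h => decide (h ∈ lstA p)) with hcnt
  -- A's outer loop: rewrite it as two independent folds over the users
  rw [outerA query L 0 ""]
  -- B's outer loop: the two components are independent folds
  have hstepB : L.foldl
      (fun st p =>
        ((setB p).foldl (fun d h => d.insert h (d.getD h 0 + 1)) st.1,
         if PySem.Set.isdisjoint (setB p) query then st.2 else some p.1))
      ((PySem.Dict.empty : PySem.Dict (List Char) Int), (none : Option String))
      = (L.foldl (fun d p => (setB p).foldl (fun (d2 : PySem.Dict (List Char) Int) h => d2.insert h (d2.getD h 0 + 1)) d) PySem.Dict.empty,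
         L.foldl (fun o p => if PySem.Set.isdisjoint (setB p) query then o else some p.1) none) :=
    PySem.List.foldl_prod_mk
      (f := fun d p => (setB p).foldl (fun (d2 : PySem.Dict (List Char) Int) h => d2.insert h (d2.getD h 0 + 1)) d)
      (g := fun o p => if PySem.Set.isdisjoint (setB p) query then o else some p.1) L _ _
  rw [hstepB]
  -- the two totals agree: per-user sums = per-hashtag sums read off the index
  have hfB : query.foldl (fun s h => s +
        (L.foldl (fun d p => (setB p).foldl (fun (d2 : PySem.Dict (List Char) Int) h2 => d2.insert h2 (d2.getD h2 0 + 1)) d)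
          PySem.Dict.empty).getD h 0) 0
      = L.foldl (fun a p => a + (cnt p : Int)) 0 := by
    rw [PySem.List.foldl_add (g := fun h =>
      (L.foldl (fun d p => (setB p).foldl (fun (d2 : PySem.Dict (List Char) Int) h2 => d2.insert h2 (d2.getD h2 0 + 1)) d)
        PySem.Dict.empty).getD h 0)]
    rw [PySem.List.foldl_add (g := fun p => (cnt p : Int))]
    simp only [zero_add]
    have hidx : ∀ h : List Char,
        (L.foldl (fun d p => (setB p).foldl (fun (d2 : PySem.Dict (List Char) Int) h2 => d2.insert h2 (d2.getD h2 0 + 1)) d)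
          PySem.Dict.empty).getD h 0 = (L.countP (fun p => decide (h ∈ setB p)) : Int) := by
      intro h
      rw [index_getD setB (fun p => nodup_setB p.2) L PySem.Dict.empty h]
      simp
    rw [List.map_congr_left (fun h _ => hidx h)]
    rw [← exchange query setB L]
    apply congrArg
    apply List.map_congr_left
    intro p _
    simp only [hcnt, hsetB, hlstA]
    exact congrArg Nat.cast (countP_setB_eq query p.2)
  rw [hfB]
  -- both branches test the same condition; in the true branch the users agree
  by_cases hcond : L.foldl (fun a p => a + (cnt p : Int)) 0 = (query.length : Int) ∧
      L.foldl (fun a p => a + (cnt p : Int)) 0 ≠ 0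
  · rw [if_pos hcond, if_pos hcond]
    -- the total is nonzero, so some user matched
    have hex : ∃ p ∈ L, cnt p ≠ 0 := by
      by_contra hno
      rw [not_exists] at hno
      simp only [not_and, not_not] at hno
      apply hcond.2
      rw [PySem.List.foldl_add (g := fun p => (cnt p : Int))]
      have : L.map (fun p => (cnt p : Int)) = L.map (fun _ => (0 : Int)) :=
        List.map_congr_left (fun p hp => by rw [hno p hp]; simp)
      rw [this]
      simp
    have hrel := snd_rel cnt (fun p => PySem.Set.isdisjoint (setB p) query) Prod.fst
      (fun p => by rw [hcnt]; exact cnt_zero_iff query p.2)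
      L "" none (fun u hu => by cases hu)
    cases ho : L.foldl (fun o p => if PySem.Set.isdisjoint (setB p) query then o else some p.1) none with
    | none =>
      obtain ⟨_, hall⟩ := hrel.2 ho
      obtain ⟨p, hp, hne⟩ := hex
      exact absurd (hall p hp) hne
    | some u =>
      exact hrel.1 u ho
  · rw [if_neg hcond, if_neg hcond]
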